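-- pv_equiv track=rewrite | github.com/Siddharth-DWT/behaviour-analysis | services/conversation_agent/feature_extractor.py | _count_monologues
-- ===== SOURCE A (Python) =====
-- MONOLOGUE_MIN_SEGMENTS = 3
--
-- def _count_monologues(speaker: str, segs: list[dict]) -> int:
--     """Count monologue runs (3+ consecutive segments from the same speaker)."""
--     count = 0
--     consecutive = 0
--
--     for seg in segs:
--         if seg["speaker"] == speaker:
--             consecutive += 1
--             if consecutive == MONOLOGUE_MIN_SEGMENTS:
--                 count += 1
--         else:
--             consecutive = 0
--
--     return count
-- ===== SOURCE B (Python) =====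
-- MONOLOGUE_MIN_SEGMENTS = 3
--
-- def _count_monologues(speaker: str, segs: list[dict]) -> int:
--     """Count monologue runs (3+ consecutive segments from the same speaker)."""
--     m = [seg["speaker"] == speaker for seg in segs]
--     return sum(
--         1
--         for i in range(len(m) - 2)
--         if m[i] and m[i + 1] and m[i + 2] and (i == 0 or not m[i - 1])
--     )
-- ===== Notes on version B (the rewrite author's own statement) =====
-- stated objective: alternative
-- what changed: Replaces A's stateful running-streak counter with a stateless two-stage formulation: build the boolean match mask once, then sum over positions a window predicate (three consecutive matches whose left neighbour does not match) that detects the start of each qualifying run.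
import Mathlib
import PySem

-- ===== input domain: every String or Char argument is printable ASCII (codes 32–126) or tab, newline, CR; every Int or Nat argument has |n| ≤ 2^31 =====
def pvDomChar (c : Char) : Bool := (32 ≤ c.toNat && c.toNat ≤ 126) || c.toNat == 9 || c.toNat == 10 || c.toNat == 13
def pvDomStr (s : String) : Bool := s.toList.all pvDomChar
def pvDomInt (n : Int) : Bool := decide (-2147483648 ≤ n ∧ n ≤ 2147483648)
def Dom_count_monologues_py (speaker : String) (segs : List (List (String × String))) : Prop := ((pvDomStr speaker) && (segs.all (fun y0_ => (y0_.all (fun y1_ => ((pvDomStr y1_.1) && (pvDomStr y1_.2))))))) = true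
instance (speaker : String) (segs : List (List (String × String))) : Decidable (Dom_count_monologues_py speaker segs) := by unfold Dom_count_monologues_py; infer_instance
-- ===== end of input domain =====

-- B replaces A's stateful running-streak counter by a stateless two-stage formulation:
-- build the boolean match mask, then sum a 4-element window predicate over positions that
-- detects the start of each run of 3+ matches (objective: alternative; return value only).

-- ===== PORT A =====
-- seg["speaker"]: first-match association-list lookup; exact under Pre_ (key present);
-- outside Pre_ Python raises KeyError and the port's `.getD ""` default is never relied on.
def pvKey (seg : List (String × String)) : String := (List.lookup "speaker" seg).getD ""

-- the body of A's for-loop over state (count, consecutive)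
def pvStepA (speaker : String) (st : Int × Int) (seg : List (String × String)) : Int × Int :=
  if pvKey seg == speaker then
    ((if st.2 + 1 == (3 : Int) then st.1 + 1 else st.1), st.2 + 1)
  else (st.1, 0)

def count_monologues_py (speaker : String) (segs : List (List (String × String))) : Int :=
  (segs.foldl (pvStepA speaker) ((0 : Int), (0 : Int))).1

-- ===== PORT B =====
-- the window test `m[i] and m[i+1] and m[i+2] and (i == 0 or not m[i-1])`
-- (positive indices stay in range under the loop bound, so pyGetD's default is never hit;
--  at i = 0 the `or` short-circuits, so `m[i-1]` is irrelevant there, as in Python)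
def pvWin (m : List Bool) (i : Int) : Bool :=
  PySem.List.pyGetD m i false && PySem.List.pyGetD m (i + 1) false &&
    PySem.List.pyGetD m (i + 2) false &&
    (i == 0 || !(PySem.List.pyGetD m (i - 1) false))

def count_monologues_py_alt (speaker : String) (segs : List (List (String × String))) : Int :=
  let m := segs.map (fun seg => pvKey seg == speaker)
  (PySem.List.pyRange 0 ((m.length : Int) - 2) 1).foldl
    (fun acc i => if pvWin m i then acc + 1 else acc) 0

-- ===== PRECONDITION & SPEC =====
-- Pre_ excludes exactly the inputs where some segment lacks the key "speaker": there
-- Python A (and B) raise KeyError instead of returning.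
def Pre_count_monologues_py (speaker : String) (segs : List (List (String × String))) : Prop :=
  (segs.all (fun seg => seg.any (fun p => p.1 == "speaker"))) = true
instance (speaker : String) (segs : List (List (String × String))) : Decidable (Pre_count_monologues_py speaker segs) := by unfold Pre_count_monologues_py; infer_instance

def pvWitness_count_monologues_py : String × (List (List (String × String))) :=
  ("A", [[("speaker", "A")], [("speaker", "A")], [("speaker", "A")], [("speaker", "B")]])

def Spec_count_monologues_py (speaker : String) (segs : List (List (String × String))) (out : Int) : Prop := out = count_monologues_py_alt speaker segs
instance (speaker : String) (segs : List (List (String × String))) (out : Int) : Decidable (Spec_count_monologues_py speaker segs out) := by unfold Spec_count_monologues_py; infer_instance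

-- ===== CLAIM (what is proved, stated in full; the proofs are below) =====
def Claim_equal_count_monologues_py : Prop := ∀ (speaker : String) (segs : List (List (String × String))), Dom_count_monologues_py speaker segs → Pre_count_monologues_py speaker segs → Spec_count_monologues_py speaker segs (count_monologues_py speaker segs)

-- ===== LEMMAS AND PROOFS =====

-- A's result as a recursion over the boolean match mask, carrying the streak length j
def pvWA (j : Int) : List Bool → Int
  | [] => 0
  | a :: t => if a then (if j + 1 == 3 then 1 else 0) + pvWA (j + 1) t else pvWA 0 t

-- B's window sum as a structural recursion over the mask, carrying the previous element
def pvW (prev : Bool) : List Bool → Int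
  | [] => 0
  | a :: t =>
      (match t with
       | b :: c :: _ => if a && b && c && !prev then (1 : Int) else 0
       | _ => 0) + pvW a t

-- the correction term: what B has already counted (at the run's start) but A has not yet
def pvCorr (j : Int) : List Bool → Int
  | [] => 0
  | [a] => if j = 2 ∧ a = true then 1 else 0
  | a :: b :: _ => if (j = 2 ∧ a = true) ∨ (j = 1 ∧ a = true ∧ b = true) then 1 else 0

-- A's fold is pvWA over the mask
lemma pv_foldA (speaker : String) (segs : List (List (String × String))) :
    ∀ (c j : Int), (segs.foldl (pvStepA speaker) (c, j)).1
      = c + pvWA j (segs.map (fun s => pvKey s == speaker)) := by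
  induction segs with
  | nil => intro c j; simp [pvWA]
  | cons s t ih =>
    intro c j
    by_cases h : (pvKey s == speaker) = true
    · simp only [List.foldl_cons, pvStepA, h, if_true, List.map_cons, pvWA]
      rw [ih]
      by_cases h3 : j + 1 = (3 : Int)
      · simp [h3]; ring
      · simp [h3]
    · simp only [List.foldl_cons, pvStepA, h, List.map_cons, pvWA,
        Bool.false_eq_true, if_false]
      rw [ih]

-- the bridge invariant: A's remaining count = B's remaining count + correction
lemma pv_WA_eq_W (m : List Bool) : ∀ (j : Int), 0 ≤ j →
    pvWA j m = pvW (decide (1 ≤ j)) m + pvCorr j m := by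
  induction m with
  | nil => intro j _; simp [pvWA, pvW, pvCorr]
  | cons a t ih =>
    intro j hj
    cases a with
    | false =>
      have h0 := ih 0 le_rfl
      simp only [pvWA, Bool.false_eq_true, if_false]
      rw [h0]
      cases t with
      | nil => simp [pvW, pvCorr]
      | cons b t' =>
        simp only [pvW, pvCorr]
        cases t' <;> simp
    | true =>
      have h1 := ih (j + 1) (by omega)
      simp only [pvWA, if_true]
      rw [h1]
      have hd : decide (1 ≤ j + 1) = true := by simp; omega
      rw [hd]
      rcases t with _ | ⟨b, t'⟩
      · -- t = []
        simp only [pvW, pvCorr]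
        by_cases h2 : j = 2
        · simp [h2]
        · have : ¬(j + 1 = (3 : Int)) := by omega
          simp [h2, this]
      · rcases t' with _ | ⟨c, t''⟩
        · -- t = [b]
          simp only [pvW, pvCorr]
          by_cases h2 : j = 2
          · have : j + 1 = (3 : Int) := by omega
            have h1' : ¬(j = 1) := by omega
            have hb2 : ¬(b = true ∧ j + 1 = 2) := by omega
            cases b <;> simp [h2, this, h1'] <;> omega
          · have h3 : ¬(j + 1 = (3 : Int)) := by omega
            by_cases hj1 : j = 1
            · have : j + 1 = (2 : Int) := by omega
              cases b <;> simp [h2, h3, hj1, this]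
            · have : ¬(j + 1 = (2 : Int)) := by omega
              cases b <;> simp [h2, h3, hj1, this] <;> omega
        · -- t = b :: c :: t''
          simp only [pvW, pvCorr]
          by_cases h2 : j = 2
          · have h3 : j + 1 = (3 : Int) := by omega
            have hnp : ¬(1 ≤ j) → False := by omega
            have hprev : decide (1 ≤ j) = true := by simp; omega
            rw [hprev]
            cases b <;> cases c <;> simp [h2, h3] <;> omega
          · have h3 : ¬(j + 1 = (3 : Int)) := by omega
            by_cases hj1 : j = 1
            · have hprev : decide (1 ≤ j) = true := by simp; omega
              rw [hprev]
              cases b <;> cases c <;> simp [h2, h3, hj1] <;> omega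
            · by_cases hj0 : j = 0
              · have hprev : decide (1 ≤ j) = false := by simp; omega
                rw [hprev]
                cases b <;> cases c <;> simp [h2, h3, hj1, hj0] <;> ring
              · have hprev : decide (1 ≤ j) = true := by simp; omega
                rw [hprev]
                have hj2 : ¬(j + 1 = (2 : Int)) := by omega
                cases b <;> cases c <;> simp [h2, h3, hj1, hj2] <;> omega

-- the generalised window predicate with an explicit "previous element" at position 0
def pvWinP (prev : Bool) (m : List Bool) (i : Int) : Bool :=
  PySem.List.pyGetD m i false && PySem.List.pyGetD m (i + 1) false &&
    PySem.List.pyGetD m (i + 2) false &&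
    (if i == 0 then !prev else !(PySem.List.pyGetD m (i - 1) false))

lemma pv_win_eq (m : List Bool) (i : Int) : pvWin m i = pvWinP false m i := by
  unfold pvWin pvWinP
  by_cases h : (i == (0 : Int)) = true <;> simp [h]

-- pyGetD through a cons at a successor natural index
lemma pv_pyGetD_cons_succ (a : Bool) (t : List Bool) (k : Nat) (d : Bool) :
    PySem.List.pyGetD (a :: t) ((k : Int) + 1) d = PySem.List.pyGetD t (k : Int) d := by
  have h1 : ((k : Int) + 1) = ((k + 1 : Nat) : Int) := by push_cast; ring
  rw [h1, PySem.List.pyGetD_natCast, PySem.List.pyGetD_natCast]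
  simp

-- B's counted window positions over the range equal pvW
lemma pv_countP_eq_W (m : List Bool) : ∀ (prev : Bool),
    (((PySem.List.pyRange 0 ((m.length : Int) - 2) 1).countP (pvWinP prev m) : Nat) : Int)
      = pvW prev m := by
  induction m with
  | nil =>
    intro prev
    rw [PySem.List.pyRange_one_eq_nil (by simp)]
    simp [pvW]
  | cons a t ih =>
    intro prev
    rcases t with _ | ⟨b, t'⟩
    · rw [PySem.List.pyRange_one_eq_nil (by simp)]
      simp [pvW]
    · rcases t' with _ | ⟨c, t''⟩
      · rw [PySem.List.pyRange_one_eq_nil (by simp)]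
        simp [pvW]
      · -- m = a :: b :: c :: t'' ; the range is nonempty
        have hpos : (0 : Int) < ((a :: b :: c :: t'').length : Int) - 2 := by simp; omega
        rw [PySem.List.pyRange_one_cons hpos, List.countP_cons]
        have h0 : pvWinP prev (a :: b :: c :: t'') 0 = (a && b && c && !prev) := by
          unfold pvWinP
          have g1 : (0 : Int) ≤ ((t''.length : Int) + 1 + 1) := by omega
          have g2 : (0 : Int) ≤ ((t''.length : Int) + 1) := by omega
          have g3 : (2 : Int) ≤ ((t''.length : Int) + 1 + 1) := by omega
          norm_num [PySem.List.pyGetD, PySem.List.pyGet?, PySem.List.pyIdx?, g1, g2, g3]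
          rfl
        -- shift the tail range onto the tail mask
        have hshift : (PySem.List.pyRange (0 + 1) (((a :: b :: c :: t'').length : Int) - 2) 1).countP
              (pvWinP prev (a :: b :: c :: t''))
            = (PySem.List.pyRange 0 (((b :: c :: t'').length : Int) - 2) 1).countP
              (pvWinP a (b :: c :: t'')) := by
          rw [PySem.List.pyRange_one, PySem.List.pyRange_one]
          have hR : ((((a :: b :: c :: t'').length : Int) - 2) - (0 + 1)).toNat
              = ((((b :: c :: t'').length : Int) - 2) - 0).toNat := by
            simp only [List.length_cons]; push_cast; omega
          rw [hR, List.countP_map, List.countP_map]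
          apply List.countP_congr
          intro k hk
          simp only [Function.comp_apply]
          have heq : pvWinP prev (a :: b :: c :: t'') (0 + 1 + (k : Int))
              = pvWinP a (b :: c :: t'') (0 + (k : Int)) := by
            unfold pvWinP
            have e0 : PySem.List.pyGetD (a :: b :: c :: t'') (0 + 1 + (k : Int)) false
                = PySem.List.pyGetD (b :: c :: t'') (0 + (k : Int)) false := by
              rw [show (0 + 1 + (k : Int)) = (k : Int) + 1 by ring]
              rw [pv_pyGetD_cons_succ a _ k false]
              norm_num
            have e1 : PySem.List.pyGetD (a :: b :: c :: t'') (0 + 1 + (k : Int) + 1) false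
                = PySem.List.pyGetD (b :: c :: t'') (0 + (k : Int) + 1) false := by
              rw [show (0 + 1 + (k : Int) + 1) = ((k + 1 : Nat) : Int) + 1 by push_cast; ring]
              rw [pv_pyGetD_cons_succ a _ (k + 1) false]
              push_cast; ring_nf
            have e2 : PySem.List.pyGetD (a :: b :: c :: t'') (0 + 1 + (k : Int) + 2) false
                = PySem.List.pyGetD (b :: c :: t'') (0 + (k : Int) + 2) false := by
              rw [show (0 + 1 + (k : Int) + 2) = ((k + 2 : Nat) : Int) + 1 by push_cast; ring]
              rw [pv_pyGetD_cons_succ a _ (k + 2) false]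
              push_cast; ring_nf
            rw [e0, e1, e2]
            have hne : ((0 + 1 + (k : Int)) == (0 : Int)) = false := by
              simp; omega
            rw [hne]
            simp only [Bool.false_eq_true, if_false]
            by_cases hk0 : k = 0
            · subst hk0
              have hz : ((0 + (0 : Nat) : Int) == (0 : Int)) = true := by norm_num
              rw [hz, if_pos rfl]
              rw [show (0 + 1 + ((0 : Nat) : Int) - 1) = (0 : Int) by norm_num]
              norm_num [PySem.List.pyGetD, PySem.List.pyGet?, PySem.List.pyIdx?]
              have g4 : (0 : Int) ≤ ((t''.length : Int) + 1 + 1) := by omega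
              simp [g4]
            · have hkc : ((0 + ((k : Nat) : Int)) == (0 : Int)) = false := by
                simp; exact_mod_cast hk0
              rw [hkc, if_neg (by simpa using hkc)]
              obtain ⟨k', rfl⟩ : ∃ k', k = k' + 1 := ⟨k - 1, by omega⟩
              rw [show (0 + 1 + ((k' + 1 : Nat) : Int) - 1) = ((k' : Int)) + 1 by push_cast; ring]
              rw [pv_pyGetD_cons_succ a _ k' false]
              rw [show (0 + ((k' + 1 : Nat) : Int) - 1) = ((k' : Int)) by push_cast; ring]
          rw [heq]
        rw [h0, hshift]
        push_cast
        rw [ih a]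
        simp only [pvW]
        by_cases hc : (a && b && c && !prev) = true <;> simp [hc] <;> ring

-- ===== VERDICT (by name: the statement is the Claim_ definition above) =====
theorem count_monologues_py_spec : Claim_equal_count_monologues_py := by
  intro speaker segs _ _
  unfold Spec_count_monologues_py count_monologues_py count_monologues_py_alt
  set m := segs.map (fun s => pvKey s == speaker) with hm
  rw [pv_foldA speaker segs 0 0]
  have hB : (PySem.List.pyRange 0 ((m.length : Int) - 2) 1).foldl
      (fun acc i => if pvWin m i then acc + 1 else acc) (0 : Int)
      = ((PySem.List.pyRange 0 ((m.length : Int) - 2) 1).countP (pvWinP false m) : Int) := by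
    rw [PySem.List.foldl_if_add_one]
    have hcong : (PySem.List.pyRange 0 ((m.length : Int) - 2) 1).countP (fun i => pvWin m i)
        = (PySem.List.pyRange 0 ((m.length : Int) - 2) 1).countP (pvWinP false m) :=
      List.countP_congr (fun x _ => by simp only [pv_win_eq])
    rw [hcong]
    ring
  rw [hB, pv_countP_eq_W m false]
  rw [pv_WA_eq_W m 0 le_rfl]
  simp [pvCorr]
  cases m with
  | nil => simp [pvCorr]
  | cons x t => cases t <;> simp [pvCorr]
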